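-- pv_equiv track=rewrite | github.com/Sangmin627/AlgoStudy2023 | 상진/Baekjoon/String/BOJ4659.py | con3
-- ===== SOURCE A (Python) =====
-- def con3(w):
--     if len(w) >= 2:
--         for i in range(1, len(w)):
--             if w[i-1] == w[i]:
--                 if w[i-1] == 'e' or w[i-1] == 'o':
--                     continue
--                 else:
--                     return False
--     return True
-- ===== SOURCE B (Python) =====
-- def con3(w):
--     return not any(c + c in w for c in set(w) if c not in 'eo')
-- ===== Notes on version B (the rewrite author's own statement) =====
-- stated objective: alternative
-- what changed: Instead of scanning adjacent index pairs with early return, B checks for each distinct character of w (outside 'eo') whether the doubled substring c+c occurs in w via substring search.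
import Mathlib
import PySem

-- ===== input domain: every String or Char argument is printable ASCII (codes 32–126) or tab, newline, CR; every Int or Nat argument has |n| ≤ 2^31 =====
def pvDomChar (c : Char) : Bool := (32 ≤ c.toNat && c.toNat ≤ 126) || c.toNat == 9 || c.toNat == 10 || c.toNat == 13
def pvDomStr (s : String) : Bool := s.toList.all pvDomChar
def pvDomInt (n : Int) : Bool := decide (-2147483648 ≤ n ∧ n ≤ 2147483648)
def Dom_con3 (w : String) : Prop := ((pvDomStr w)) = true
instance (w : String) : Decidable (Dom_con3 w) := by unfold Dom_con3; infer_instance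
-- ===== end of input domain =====

-- B replaces A's adjacent-pair index scan by per-distinct-character doubled-substring search (c+c in w for c in set(w) outside 'eo'); objective: alternative.


-- ===== PORT A =====
-- for-loop over range(1, len(w)) with early `return False`, as a recursion over the index list
def con3Go (cs : List Char) : List Int → Bool
  | [] => true
  | i :: rest =>
    match PySem.List.pyGet? cs (i - 1), PySem.List.pyGet? cs i with
    | some a, some b =>
      if a == b then
        if a == 'e' || a == 'o' then con3Go cs rest else false
      else con3Go cs rest
    | _, _ => true  -- unreachable: indices produced by range(1, len(w)) are in range

def con3 (w : String) : Bool :=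
  if PySem.Str.len w ≥ 2 then
    con3Go w.toList (PySem.List.pyRange 1 (PySem.Str.len w) 1)
  else true

-- ===== PORT B =====
-- not any(c + c in w for c in set(w) if c not in 'eo'); the generator's `if` filter is the && in the any-predicate
def con3_alt (w : String) : Bool :=
  !((PySem.Set.ofList w.toList).any (fun c =>
      !(PySem.Str.isIn (String.ofList [c]) "eo") && PySem.Str.isIn (String.ofList [c, c]) w))

-- ===== PRECONDITION & SPEC =====
def Spec_con3 (w : String) (out : Bool) : Prop := out = con3_alt w
instance (w : String) (out : Bool) : Decidable (Spec_con3 w out) := by unfold Spec_con3; infer_instance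

-- ===== CLAIM (what is proved, stated in full; the proofs are below) =====
def Claim_equal_con3 : Prop := ∀ (w : String), Dom_con3 w → Spec_con3 w (con3 w)

-- ===== LEMMAS AND PROOFS =====

theorem con3Go_eq (cs : List Char) (k : Nat)
    (h : k + 1 ≤ cs.length) :
    con3Go cs (PySem.List.pyRange ((k : Int) + 1) (cs.length : Int) 1)
      = ((cs.drop k).zip (cs.drop k).tail).all
          (fun p => !(p.1 == p.2) || (p.1 == 'e' || p.1 == 'o')) := by
  by_cases hlt : k + 1 < cs.length
  · have hcons : PySem.List.pyRange ((k : Int) + 1) (cs.length : Int) 1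
        = ((k : Int) + 1) :: PySem.List.pyRange ((k : Int) + 1 + 1) (cs.length : Int) 1 :=
      PySem.List.pyRange_one_cons (by exact_mod_cast hlt)
    have hk : k < cs.length := by omega
    have hdk : cs.drop k = cs[k] :: cs.drop (k + 1) := List.drop_eq_getElem_cons hk
    have hdk1 : cs.drop (k + 1) = cs[k + 1] :: cs.drop (k + 2) := List.drop_eq_getElem_cons hlt
    have hg1 : PySem.List.pyGet? cs ((k : Int) + 1 - 1) = some cs[k] := by
      have : (k : Int) + 1 - 1 = (k : Int) := by ring
      rw [this, PySem.List.pyGet?_natCast, List.getElem?_eq_getElem hk]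
    have hg2 : PySem.List.pyGet? cs ((k : Int) + 1) = some cs[k + 1] := by
      have : (k : Int) + 1 = ((k + 1 : Nat) : Int) := by push_cast; ring
      rw [this, PySem.List.pyGet?_natCast, List.getElem?_eq_getElem hlt]
    have ih := con3Go_eq cs (k + 1) (by omega)
    have hcast : (k : Int) + 1 + 1 = ((k + 1 : Nat) : Int) + 1 := by push_cast; ring
    rw [hcons]
    simp only [con3Go, hg1, hg2, hcast, ih, hdk, hdk1]
    simp only [List.tail_cons, List.zip_cons_cons, List.all_cons]
    by_cases he : cs[k] == cs[k + 1]
    · simp only [he, if_true, Bool.not_true, Bool.false_or]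
      by_cases heo : (cs[k] == 'e' || cs[k] == 'o') = true
      · simp [heo]
      · simp [Bool.eq_false_iff.mpr heo]
    · have he' : (cs[k] == cs[k + 1]) = false := Bool.eq_false_iff.mpr he
      simp [he']
  · have hnil : PySem.List.pyRange ((k : Int) + 1) (cs.length : Int) 1 = [] :=
      PySem.List.pyRange_one_eq_nil (by omega)
    have hdrop : (cs.drop k).tail = [] := by
      have : cs.drop (k + 1) = [] := List.drop_eq_nil_of_le (by omega)
      simpa [List.tail_drop] using this
    simp [hnil, hdrop, con3Go]
termination_by cs.length - k

-- (c,c) appears as an adjacent pair of cs iff [c,c] is an infix of cs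
theorem pair_mem_zip_iff_infix (cs : List Char) (c : Char) :
    (c, c) ∈ cs.zip cs.tail ↔ [c, c] <:+: cs := by
  induction cs with
  | nil => simp
  | cons a rest ih =>
    cases rest with
    | nil =>
      simp only [List.tail_cons, List.zip_nil_right, List.not_mem_nil, false_iff]
      intro h
      have := h.sublist.length_le
      simp at this
    | cons b rest' =>
      simp only [List.tail_cons, List.zip_cons_cons, List.mem_cons]
      rw [List.infix_cons_iff, ← ih]
      simp only [List.tail_cons]
      constructor
      · rintro (h | h)
        · obtain ⟨ha, hb⟩ := Prod.mk.inj h.symm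
          subst ha; subst hb
          exact Or.inl (List.cons_prefix_cons.mpr ⟨rfl, List.cons_prefix_cons.mpr ⟨rfl, List.nil_prefix⟩⟩)
        · exact Or.inr h
      · rintro (h | h)
        · obtain ⟨h1, h2⟩ := List.cons_prefix_cons.mp h
          obtain ⟨h3, _⟩ := List.cons_prefix_cons.mp h2
          left; rw [← h1, ← h3]
        · exact Or.inr h

theorem singleton_infix_iff (c : Char) (l : List Char) : [c] <:+: l ↔ c ∈ l := by
  constructor
  · intro h; exact h.subset (List.mem_singleton_self c)
  · intro h
    obtain ⟨s, t, rfl⟩ := List.mem_iff_append.mp h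
    exact ⟨s, t, by simp⟩

theorem isIn_eo_iff (c : Char) :
    PySem.Str.isIn (String.ofList [c]) "eo" = true ↔ (c = 'e' ∨ c = 'o') := by
  have hb : PySem.Str.isIn (String.ofList [c]) "eo" = PySem.Chars.isIn [c] "eo".toList := by
    simp [PySem.Str.isIn]
  rw [hb, PySem.Chars.isIn_iff_infix, singleton_infix_iff]
  have : "eo".toList = ['e', 'o'] := rfl
  rw [this]
  simp

theorem isIn_double_iff (c : Char) (w : String) :
    PySem.Str.isIn (String.ofList [c, c]) w = true ↔ [c, c] <:+: w.toList := by
  have hb : PySem.Str.isIn (String.ofList [c, c]) w = PySem.Chars.isIn [c, c] w.toList := by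
    simp [PySem.Str.isIn]
  rw [hb, PySem.Chars.isIn_iff_infix]

theorem all_pairs_eq_alt (w : String) :
    ((w.toList.zip w.toList.tail).all (fun p => !(p.1 == p.2) || (p.1 == 'e' || p.1 == 'o')))
      = con3_alt w := by
  unfold con3_alt
  rw [Bool.eq_iff_iff]
  simp only [Bool.not_eq_true', List.all_eq_true, List.any_eq_false]
  constructor
  · intro hall c hc hpred
    have h2 : PySem.Str.isIn (String.ofList [c, c]) w = true := by
      cases hB : PySem.Str.isIn (String.ofList [c, c]) w
      · rw [hB] at hpred; simp at hpred
      · rfl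
    have h1 : PySem.Str.isIn (String.ofList [c]) "eo" = false := by
      cases hA : PySem.Str.isIn (String.ofList [c]) "eo"
      · rfl
      · rw [hA] at hpred; simp at hpred
    have hinf : [c, c] <:+: w.toList := (isIn_double_iff c w).mp h2
    have hz : (c, c) ∈ w.toList.zip w.toList.tail := (pair_mem_zip_iff_infix w.toList c).mpr hinf
    have h3 := hall _ hz
    simp only [beq_self_eq_true, Bool.not_true, Bool.false_or, Bool.or_eq_true, beq_iff_eq] at h3
    have h4 : PySem.Str.isIn (String.ofList [c]) "eo" = true := (isIn_eo_iff c).mpr h3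
    rw [h4] at h1
    simp at h1
  · intro hnone p hp
    obtain ⟨x, y⟩ := p
    by_cases hxy : (x == y) = true
    · have hxy' : x = y := (beq_iff_eq).mp hxy
      cases hxy'
      have hmem : x ∈ w.toList := (List.of_mem_zip hp).1
      have h := hnone x ((PySem.Set.mem_ofList w.toList x).mpr hmem)
      simp only [Bool.and_eq_true, Bool.not_eq_true', not_and] at h
      by_cases heo : (x = 'e' ∨ x = 'o')
      · rcases heo with h' | h' <;> simp [h']
      · exfalso
        have h1 : PySem.Str.isIn (String.ofList [x]) "eo" = false := by
          rw [Bool.eq_false_iff]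
          intro hin
          exact heo ((isIn_eo_iff x).mp hin)
        exact h h1 ((isIn_double_iff x w).mpr ((pair_mem_zip_iff_infix w.toList x).mp hp))
    · have hf : (x == y) = false := Bool.eq_false_iff.mpr hxy
      simp [hf]

-- ===== VERDICT (by name: the statement is the Claim_ definition above) =====
theorem con3_spec : Claim_equal_con3 := by
  intro w _
  unfold Spec_con3 con3
  by_cases h2 : PySem.Str.len w ≥ 2
  · have hlen : 1 ≤ w.toList.length := by
      have := PySem.Str.len_eq w
      omega
    have hgo := con3Go_eq w.toList 0 hlen
    rw [if_pos h2]
    simpa using hgo.trans (all_pairs_eq_alt w)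
  · have hlen : w.toList.length < 2 := by
      have := PySem.Str.len_eq w
      omega
    rw [if_neg h2, ← all_pairs_eq_alt w]
    match hwl : w.toList with
    | [] => simp
    | [a] => simp
    | a :: b :: rest => rw [hwl] at hlen; simp at hlen
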